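-- pv_equiv track=rewrite | github.com/guisolski/projetos-Python | arquivos/similaridade.py | unicos
-- ===== SOURCE A (Python) =====
-- def unicos(X):
--     B = []
--     for i in range(len(X)):
--         if(i<= len(X)-2):
--           aux = str(X[i])+str(X[i+1])
--           if(aux in B):
--               B.remove(aux)
--           else:
--               B.append(aux)
--     return B
-- ===== SOURCE B (Python) =====
-- def unicos(X):
--     P = [str(X[i]) + str(X[i + 1]) for i in range(len(X) - 1)]
--     cnt = {}
--     last = {}
--     for i, p in enumerate(P):
--         cnt[p] = cnt.get(p, 0) + 1
--         last[p] = i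
--     return [p for i, p in enumerate(P) if last[p] == i and cnt[p] % 2 == 1]
-- ===== Notes on version B (the rewrite author's own statement) =====
-- stated objective: faster
-- what changed: A incrementally toggles each consecutive-pair string in/out of a result list via linear membership test, remove and append; B makes one pass building count and last-occurrence dicts over the pair list and then keeps each pair at its last occurrence iff its total count is odd.
import Mathlib
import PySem

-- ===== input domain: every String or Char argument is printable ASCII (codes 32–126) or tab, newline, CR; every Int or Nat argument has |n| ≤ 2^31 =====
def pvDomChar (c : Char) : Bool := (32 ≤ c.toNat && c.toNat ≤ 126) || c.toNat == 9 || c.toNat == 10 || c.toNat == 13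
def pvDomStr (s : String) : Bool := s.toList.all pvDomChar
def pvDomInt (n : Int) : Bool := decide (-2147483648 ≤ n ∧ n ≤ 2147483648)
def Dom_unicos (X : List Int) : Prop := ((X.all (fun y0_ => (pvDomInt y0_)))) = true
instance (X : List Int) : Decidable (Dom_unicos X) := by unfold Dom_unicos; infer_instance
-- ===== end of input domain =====

-- B replaces A's quadratic append/remove toggle list by one pass building count and
-- last-occurrence dicts, then keeps each pair at its last occurrence iff its count is odd.

-- ===== PORT A =====
-- Literal port of A: fold over range(len(X)) with the i <= len(X)-2 guard; inside the guard
-- both indices are in range, so pyGetD's default 0 and remove?'s .getD fallback are never used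
-- (aux ∈ B is checked before remove, exactly as in A).
def unicos (X : List Int) : List String :=
  (PySem.List.pyRange 0 (X.length : Int) 1).foldl
    (fun B i =>
      if i ≤ (X.length : Int) - 2 then
        let aux := PySem.Int.toStr (PySem.List.pyGetD X i 0) ++
                   PySem.Int.toStr (PySem.List.pyGetD X (i + 1) 0)
        if aux ∈ B then (PySem.List.remove? B aux).getD B else B ++ [aux]
      else B) []

-- ===== PORT B =====
-- B-side helper: the list P of Source B ([str(X[i])+str(X[i+1]) for i in range(len(X)-1)]).
-- In unicos_alt, cl = (cnt, last); getD defaults (-1)/0 are never used: every filtered key is in both dicts.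
def pvPairsB (X : List Int) : List String :=
  (PySem.List.pyRange 0 ((X.length : Int) - 1) 1).map
    (fun i => PySem.Int.toStr (PySem.List.pyGetD X i 0) ++
              PySem.Int.toStr (PySem.List.pyGetD X (i + 1) 0))

def unicos_alt (X : List Int) : List String :=
  let P := pvPairsB X
  let cl := (PySem.List.enumerate P 0).foldl
    (fun s ip => (s.1.insert ip.2 (s.1.getD ip.2 0 + 1), s.2.insert ip.2 ip.1))
    ((PySem.Dict.empty : PySem.Dict String Int), (PySem.Dict.empty : PySem.Dict String Int))
  ((PySem.List.enumerate P 0).filter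
    (fun ip => (cl.2.getD ip.2 (-1) == ip.1) && (cl.1.getD ip.2 0 % 2 == 1))).map (·.2)

-- ===== PRECONDITION & SPEC =====
def Spec_unicos (X : List Int) (out : List String) : Prop := out = unicos_alt X
instance (X : List Int) (out : List String) : Decidable (Spec_unicos X out) := by unfold Spec_unicos; infer_instance

-- ===== CLAIM (what is proved, stated in full; the proofs are below) =====
def Claim_equal_unicos : Prop := ∀ (X : List Int), Dom_unicos X → Spec_unicos X (unicos X)

-- ===== LEMMAS AND PROOFS =====

-- A's loop step: toggle membership of p in B.
def pvStep (B : List String) (p : String) : List String :=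
  if p ∈ B then B.erase p else B ++ [p]

-- B's result as a function of the pair list: last occurrence with odd count survives.
def pvSurv (P : List String) : List String :=
  (P.zipIdx.filter (fun x => decide (x.1 ∉ P.drop (x.2 + 1)) && (P.count x.1 % 2 == 1))).map (·.1)

theorem pvSurv_snoc (P : List String) (p : String) :
    pvSurv (P ++ [p]) =
      (pvSurv P).filter (fun q => q != p) ++ (if P.count p % 2 = 0 then [p] else []) := by
  unfold pvSurv
  rw [List.zipIdx_append, List.filter_append, List.map_append]
  congr 1
  · rw [List.filter_map, List.filter_filter]
    congr 1
    apply List.filter_congr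
    rintro ⟨q, k⟩ hmem
    obtain ⟨-, hk, hq⟩ := List.mem_zipIdx hmem
    simp only [Nat.zero_add] at hk
    have hdrop : (P ++ [p]).drop (k + 1) = P.drop (k + 1) ++ [p] :=
      List.drop_append_of_le_length (by omega)
    simp only [hdrop, Function.comp, List.mem_append, List.mem_singleton, List.count_append,
      List.count_singleton]
    by_cases hqp : q = p
    · subst hqp; simp
    · simp [hqp, Ne.symm hqp]
  · simp [List.zipIdx, List.filter_singleton, List.count_append]
    split_ifs with h1
    · have h2 : (List.count p P + 1) % 2 = 1 := by omega
      simp [h2]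
    · have h2 : (List.count p P + 1) % 2 = 0 := by omega
      simp [h2]

theorem pvMem_surv (P : List String) (p : String) : p ∈ pvSurv P ↔ P.count p % 2 = 1 := by
  induction P using List.reverseRecOn with
  | nil => simp [pvSurv]
  | append_singleton Q q ih =>
    rw [pvSurv_snoc, List.mem_append, List.mem_filter, List.count_append, List.count_singleton]
    by_cases hpq : p = q
    · subst hpq
      by_cases h : Q.count p % 2 = 0
      · simp [h]; omega
      · simp [h]; omega
    · have : (q == p) = false := by simp [Ne.symm hpq]
      rw [this]
      simp only [Bool.false_eq_true, if_false, add_zero]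
      constructor
      · rintro (⟨hmem, -⟩ | hmem)
        · exact ih.mp hmem
        · exfalso; revert hmem; split_ifs <;> simp [hpq]
      · intro h
        left
        exact ⟨ih.mpr h, by simp [hpq]⟩

theorem pvNodup_surv (P : List String) : (pvSurv P).Nodup := by
  induction P using List.reverseRecOn with
  | nil => simp [pvSurv]
  | append_singleton Q q ih =>
    rw [pvSurv_snoc]
    apply List.Nodup.append
    · exact ih.filter _
    · split_ifs <;> simp
    · intro x hx hx'
      have : x = q := by revert hx'; split_ifs <;> simp
      subst this
      simp [List.mem_filter] at hx

theorem pvToggle_eq_surv (P : List String) : P.foldl pvStep [] = pvSurv P := by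
  induction P using List.reverseRecOn with
  | nil => simp [pvSurv]
  | append_singleton Q q ih =>
    rw [List.foldl_append, List.foldl_cons, List.foldl_nil, ih, pvSurv_snoc, pvStep]
    by_cases h : Q.count q % 2 = 1
    · rw [if_pos ((pvMem_surv Q q).mpr h), if_neg (by omega)]
      rw [(pvNodup_surv Q).erase_eq_filter]
      simp
    · rw [if_neg (fun hc => h ((pvMem_surv Q q).mp hc)), if_pos (by omega)]
      rw [List.filter_eq_self.mpr]
      intro x hx
      have : x ≠ q := fun he => h ((pvMem_surv Q q).mp (he ▸ hx))
      simp [this]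

def pvLastD (P : List String) : PySem.Dict String Int :=
  (PySem.List.enumerate P 0).foldl (fun d ip => d.insert ip.2 ip.1) PySem.Dict.empty

theorem pvLastD_spec (P : List String) (q : String) (hq : q ∈ P) :
    ∃ j : Nat, j < P.length ∧ P[j]? = some q ∧ q ∉ P.drop (j + 1) ∧
      (pvLastD P).getD q (-1) = (j : Int) := by
  induction P using List.reverseRecOn with
  | nil => simp at hq
  | append_singleton Q p ih =>
    have hlast : pvLastD (Q ++ [p]) = (pvLastD Q).insert p (Q.length : Int) := by
      unfold pvLastD
      rw [PySem.List.enumerate_append, List.foldl_append]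
      simp [PySem.List.enumerate]
    by_cases hqp : q = p
    · subst hqp
      refine ⟨Q.length, by simp, by simp, by simp, ?_⟩
      rw [hlast, PySem.Dict.getD_insert]
      simp
    · have hqQ : q ∈ Q := by
        rcases List.mem_append.mp hq with h | h
        · exact h
        · simp at h; exact absurd h hqp
      obtain ⟨j, hj, hjq, hnd, hgd⟩ := ih hqQ
      refine ⟨j, by simp; omega, ?_, ?_, ?_⟩
      · rw [List.getElem?_append_left hj]; exact hjq
      · rw [List.drop_append_of_le_length (by omega)]
        simp [hnd, hqp]
      · rw [hlast, PySem.Dict.getD_insert, if_neg hqp]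
        exact hgd

theorem pvMemDrop (P : List String) (q : String) (m j : Nat) (hj : j < P.length)
    (hm : m ≤ j) (hq : P[j] = q) : q ∈ P.drop m := by
  subst hq
  rw [List.mem_iff_getElem]
  refine ⟨j - m, by rw [List.length_drop]; omega, ?_⟩
  rw [List.getElem_drop]
  congr 1
  omega

def pvCntD (P : List String) : PySem.Dict String Int :=
  P.foldl (fun d x => d.insert x (d.getD x 0 + 1)) PySem.Dict.empty

theorem pvCntD_getD (P : List String) (q : String) :
    (pvCntD P).getD q 0 = (P.count q : Int) := by
  unfold pvCntD
  rw [PySem.Dict.getD_foldl_insert_add_one]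
  simp

theorem pvB_eq_surv (X : List Int) : unicos_alt X = pvSurv (pvPairsB X) := by
  unfold unicos_alt
  show ((PySem.List.enumerate (pvPairsB X) 0).filter
    (fun ip => (((PySem.List.enumerate (pvPairsB X) 0).foldl
      (fun s ip => (s.1.insert ip.2 (s.1.getD ip.2 0 + 1), s.2.insert ip.2 ip.1))
      ((PySem.Dict.empty : PySem.Dict String Int), (PySem.Dict.empty : PySem.Dict String Int))).2.getD ip.2 (-1) == ip.1) &&
      (((PySem.List.enumerate (pvPairsB X) 0).foldl
      (fun s ip => (s.1.insert ip.2 (s.1.getD ip.2 0 + 1), s.2.insert ip.2 ip.1))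
      ((PySem.Dict.empty : PySem.Dict String Int), (PySem.Dict.empty : PySem.Dict String Int))).1.getD ip.2 0 % 2 == 1))).map (·.2)
    = pvSurv (pvPairsB X)
  generalize pvPairsB X = P
  have hsplit : ∀ (l : List (Int × String)) (c0 l0 : PySem.Dict String Int),
      l.foldl (fun s ip => (s.1.insert ip.2 (s.1.getD ip.2 0 + 1), s.2.insert ip.2 ip.1)) (c0, l0)
      = (l.foldl (fun d ip => d.insert ip.2 (d.getD ip.2 0 + 1)) c0,
         l.foldl (fun d ip => d.insert ip.2 ip.1) l0) := by
    intro l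
    induction l with
    | nil => intro c0 l0; rfl
    | cons x t iht => intro c0 l0; simp only [List.foldl_cons]; exact iht _ _
  rw [hsplit]
  have h1 := List.foldl_map (f := fun p : Int × String => p.2)
      (g := fun (d : PySem.Dict String Int) x => d.insert x (d.getD x 0 + 1))
      (l := PySem.List.enumerate P 0) (init := (PySem.Dict.empty : PySem.Dict String Int))
  rw [PySem.List.map_snd_enumerate] at h1
  rw [show (PySem.List.enumerate P 0).foldl
        (fun (d : PySem.Dict String Int) ip => d.insert ip.2 (d.getD ip.2 0 + 1)) PySem.Dict.empty
      = pvCntD P from (h1.symm : _)]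
  rw [show (PySem.List.enumerate P 0).foldl
        (fun (d : PySem.Dict String Int) ip => d.insert ip.2 ip.1) PySem.Dict.empty
      = pvLastD P from rfl]
  unfold pvSurv
  rw [PySem.List.enumerate_eq_zipIdx_map, List.filter_map, List.map_map]
  rw [List.filter_congr (q := (fun x => decide (x.1 ∉ P.drop (x.2 + 1)) && (P.count x.1 % 2 == 1)) ∘ id) ?_]
  · rw [Function.comp_id]; rfl
  · rintro ⟨q, k⟩ hmem
    obtain ⟨-, hk, hq⟩ := List.mem_zipIdx hmem
    simp only [Nat.zero_add] at hk
    have hqP : q ∈ P := by rw [List.mem_iff_getElem]; exact ⟨k, hk, hq.symm⟩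
    obtain ⟨j, hj, hjq, hnd, hgd⟩ := pvLastD_spec P q hqP
    have hmod : (((P.count q : Int)) % 2 == 1) = (P.count q % 2 == 1) := by
      rcases Nat.mod_two_eq_zero_or_one (P.count q) with h | h
      · have h2 : (P.count q : Int) % 2 = 0 := by omega
        simp [h, h2]
      · have h2 : (P.count q : Int) % 2 = 1 := by omega
        simp [h, h2]
    have hidx : (((j : Int) == 0 + (k : Int))) = decide (q ∉ P.drop (k + 1)) := by
      by_cases hjk : j = k
      · subst hjk
        simp [hnd]
      · have hkj : k < j := by
          rcases Nat.lt_or_ge k j with h | h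
          · exact h
          · exfalso
            apply hnd
            exact pvMemDrop P q (j + 1) k hk (by omega) hq.symm
        have hL : (((j : Int) == 0 + (k : Int))) = false := by
          simp; omega
        have hR : q ∈ P.drop (k + 1) := by
          obtain ⟨h1, hPj⟩ := List.getElem?_eq_some_iff.mp hjq
          exact pvMemDrop P q (k + 1) j hj (by omega) hPj
        rw [hL, decide_eq_false (by simpa using hR)]
    simp only [Function.comp, id, pvCntD_getD, hgd, hmod, hidx]
    rfl

theorem pvA_eq_toggle (X : List Int) : unicos X = (pvPairsB X).foldl pvStep [] := by
  rcases X with _ | ⟨x, xs⟩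
  · rfl
  · set X := x :: xs with hX
    have hn : 1 ≤ (X.length : Int) := by simp [hX]
    unfold unicos pvPairsB
    rw [PySem.List.pyRange_one_append 0 ((X.length : Int) - 1) (X.length : Int)
          (by omega) (by omega), List.foldl_append]
    have htail : PySem.List.pyRange ((X.length : Int) - 1) (X.length : Int) 1
        = [(X.length : Int) - 1] := by
      rw [PySem.List.pyRange_one_cons (by omega)]
      rw [PySem.List.pyRange_one_eq_nil (by omega)]
    rw [htail, List.foldl_cons, List.foldl_nil, if_neg (by omega), List.foldl_map]
    apply PySem.List.foldl_congr_mem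
    intro B i hi
    rw [PySem.List.mem_pyRange_one] at hi
    rw [if_pos (by omega)]
    show (if _ ∈ B then _ else _) = pvStep B _
    unfold pvStep
    split_ifs with h
    · rw [PySem.List.remove?_eq_some_erase B _ h, Option.getD_some]
    · rfl

-- ===== VERDICT (by name: the statement is the Claim_ definition above) =====
theorem unicos_spec : Claim_equal_unicos := by
  intro X _
  unfold Spec_unicos
  rw [pvA_eq_toggle, pvB_eq_surv, pvToggle_eq_surv]
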